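-- pv_equiv track=rewrite | github.com/gruntwurk/Asciidoc-Prose | source/asciidoc_utils.py | unwrap_paragraphs
-- ===== SOURCE A (Python) =====
-- def unwrap_paragraphs(txt):
--     """
--     In AsciiDoc, paragraphs are represented by text that (can) span multiple
--     lines, and one or more blank lines designates the break between paragraphs.
--     This function undoes that, combining the text of each paragraph onto a
--     single line, leaving no blank lines.
--     """
--     paragraphs = []
--     paragraph = []
--     lines = txt.splitlines()
--     for line in lines:
--         if line := line.rstrip():
--             paragraph.append(line)
--         else:
--             combined_paragraph = " ".join(paragraph)
--             paragraph = []
--             if combined_paragraph: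
--                 paragraphs.append(combined_paragraph)
--     if paragraph:
--         paragraphs.append(" ".join(paragraph))
--     return "\n".join(paragraphs)
-- ===== SOURCE B (Python) =====
-- def _split_runs(lines):
--     # Maximal runs of non-blank lines, by recursion with a forward scan.
--     if not lines:
--         return []
--     if not lines[0]:
--         return _split_runs(lines[1:])
--     k = 0
--     while k < len(lines) and lines[k]:
--         k += 1
--     return [lines[:k]] + _split_runs(lines[k:])
--
--
-- def unwrap_paragraphs(txt):
--     lines = [line.rstrip() for line in txt.splitlines()]
--     return "\n".join(" ".join(run) for run in _split_runs(lines))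
-- ===== Notes on version B (the rewrite author's own statement) =====
-- stated objective: alternative
-- what changed: Replaces A's flush-on-blank running-buffer accumulator with a group-first shape: recursively split the rstripped lines into maximal non-blank runs, then space-join each run and newline-join the results.
import Mathlib
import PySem

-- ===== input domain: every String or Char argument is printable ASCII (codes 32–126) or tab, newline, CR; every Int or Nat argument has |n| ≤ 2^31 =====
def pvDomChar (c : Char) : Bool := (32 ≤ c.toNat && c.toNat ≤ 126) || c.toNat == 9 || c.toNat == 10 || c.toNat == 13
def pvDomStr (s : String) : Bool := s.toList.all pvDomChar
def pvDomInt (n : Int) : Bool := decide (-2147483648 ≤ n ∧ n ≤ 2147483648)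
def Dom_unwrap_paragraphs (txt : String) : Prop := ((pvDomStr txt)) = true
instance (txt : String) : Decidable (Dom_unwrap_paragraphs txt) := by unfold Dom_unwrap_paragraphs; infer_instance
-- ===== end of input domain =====

-- B replaces A's flush-on-blank running accumulator with a group-first shape
-- (split the rstripped lines into maximal non-blank runs, then join each run);
-- same cost, different decomposition (objective: alternative).


-- ===== PORT A =====
-- body of A's for-loop, after the walrus `line := line.rstrip()` has been applied
def stepA (st : List String × List String) (line : String) : List String × List String :=
  if line ≠ "" then (st.1, st.2 ++ [line])
  else
    let combined := PySem.Str.join " " st.2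
    if combined ≠ "" then (st.1 ++ [combined], ([] : List String))
    else (st.1, ([] : List String))

def unwrap_paragraphs (txt : String) : String :=
  let lines := PySem.Str.splitlines txt
  let st := lines.foldl (fun st line => stepA st (PySem.Str.rstrip line)) ([], [])
  let paragraphs := if st.2 ≠ [] then st.1 ++ [PySem.Str.join " " st.2] else st.1
  PySem.Str.join "\n" paragraphs

-- ===== PORT B =====
-- _split_runs: maximal runs of non-blank lines (the inner forward scan `while k < len and lines[k]`
-- is ported as takeWhile/dropWhile of the non-blank predicate — exactly the split lines[:k] / lines[k:])
def splitRuns : List String → List (List String)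
  | [] => []
  | l :: ls =>
    if l = "" then splitRuns ls
    else (l :: ls.takeWhile (· ≠ "")) :: splitRuns (ls.dropWhile (· ≠ ""))
termination_by ls => ls.length
decreasing_by
  · simp
  · simpa using Nat.lt_succ_of_le (List.length_dropWhile_le _ _)

def unwrap_paragraphs_alt (txt : String) : String :=
  let lines := (PySem.Str.splitlines txt).map PySem.Str.rstrip
  PySem.Str.join "\n" ((splitRuns lines).map (PySem.Str.join " "))

-- ===== PRECONDITION & SPEC =====
def Spec_unwrap_paragraphs (txt : String) (out : String) : Prop := out = unwrap_paragraphs_alt txt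
instance (txt : String) (out : String) : Decidable (Spec_unwrap_paragraphs txt out) := by unfold Spec_unwrap_paragraphs; infer_instance

-- ===== CLAIM (what is proved, stated in full; the proofs are below) =====
def Claim_equal_unwrap_paragraphs : Prop := ∀ (txt : String), Dom_unwrap_paragraphs txt → Spec_unwrap_paragraphs txt (unwrap_paragraphs txt)

-- ===== LEMMAS AND PROOFS =====

-- " ".join of a nonempty list of nonempty strings is nonempty
lemma join_sp_ne (run : List String) (h : ∀ s ∈ run, s ≠ "") (hne : run ≠ []) :
    PySem.Str.join " " run ≠ "" := by
  match run, hne with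
  | a :: rest, _ =>
    have ha : a.toList ≠ [] := by
      simpa [String.toList_eq_nil_iff] using h a (by simp)
    intro hcontra
    have : (PySem.Str.join " " (a :: rest)).toList = [] := by rw [hcontra]; rfl
    rw [PySem.Str.toList_join] at this
    simp only [PySem.Chars.join, List.map_cons] at this
    revert this
    cases rest <;> simp_all [List.intercalate]

-- splitRuns of a nonempty all-nonblank run followed by a blank line peels off exactly that run
lemma splitRuns_run_blank (r : List String) (ls : List String)
    (h : ∀ s ∈ r, s ≠ "") (hne : r ≠ []) :
    splitRuns (r ++ "" :: ls) = r :: splitRuns ls := by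
  match r, hne with
  | a :: r', _ =>
    have ha : ¬ (a = "") := h a (by simp)
    have hr' : ∀ s ∈ r', decide (s ≠ "") = true :=
      fun s hs => decide_eq_true (h s (by simp [hs]))
    rw [List.cons_append, splitRuns, if_neg ha]
    rw [List.takeWhile_append_of_pos hr', List.dropWhile_append_of_pos hr']
    simp [splitRuns]

-- splitRuns of a nonempty all-nonblank run alone is that single run
lemma splitRuns_run (r : List String) (h : ∀ s ∈ r, s ≠ "") (hne : r ≠ []) :
    splitRuns r = [r] := by
  match r, hne with
  | a :: r', _ =>
    have ha : ¬ (a = "") := h a (by simp)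
    have hr' : ∀ s ∈ r', decide (s ≠ "") = true :=
      fun s hs => decide_eq_true (h s (by simp [hs]))
    rw [splitRuns, if_neg ha, List.takeWhile_eq_self_iff.mpr hr',
        List.dropWhile_eq_nil_iff.mpr (by intro x hx; simpa using hr' x hx)]
    simp [splitRuns]

-- loop invariant: A's fold with pending run `run` produces acc ++ the joined runs of run ++ ls
lemma loopA_eq (ls : List String) : ∀ (acc run : List String), (∀ s ∈ run, s ≠ "") →
    (let st := ls.foldl stepA (acc, run);
     if st.2 ≠ [] then st.1 ++ [PySem.Str.join " " st.2] else st.1)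
    = acc ++ (splitRuns (run ++ ls)).map (PySem.Str.join " ") := by
  induction ls with
  | nil =>
    intro acc run h
    by_cases hr : run = []
    · subst hr; simp [splitRuns]
    · simp only [List.foldl_nil, List.append_nil, if_pos hr,
        splitRuns_run run h hr, List.map_cons, List.map_nil]
  | cons l ls ih =>
    intro acc run h
    by_cases hl : l = ""
    · subst hl
      by_cases hr : run = []
      · subst hr
        have hstep : stepA (acc, []) "" = (acc, []) := by
          simp [stepA, show PySem.Str.join " " [] = "" from rfl]
        simp only [List.foldl_cons, hstep]
        simpa [splitRuns] using ih acc [] (by simp)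
      · have hj := join_sp_ne run h hr
        have hstep : stepA (acc, run) "" = (acc ++ [PySem.Str.join " " run], []) := by
          simp [stepA, hj]
        simp only [List.foldl_cons, hstep]
        rw [ih (acc ++ [PySem.Str.join " " run]) [] (by simp),
            splitRuns_run_blank run ls h hr]
        simp
    · have hstep : stepA (acc, run) l = (acc, run ++ [l]) := by
        simp [stepA, hl]
      simp only [List.foldl_cons, hstep]
      rw [ih acc (run ++ [l]) (by intro s hs; rcases List.mem_append.mp hs with h' | h'
                                  · exact h s h'
                                  · simpa using fun e => hl (by simpa [e] using h'))]
      simp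

-- ===== VERDICT (by name: the statement is the Claim_ definition above) =====
theorem unwrap_paragraphs_spec : Claim_equal_unwrap_paragraphs := by
  intro txt _
  unfold Spec_unwrap_paragraphs unwrap_paragraphs unwrap_paragraphs_alt
  simp only []
  rw [← List.foldl_map (f := PySem.Str.rstrip) (g := stepA)]
  exact congrArg (PySem.Str.join "\n")
    (by simpa using loopA_eq ((PySem.Str.splitlines txt).map PySem.Str.rstrip) [] [] (by simp))
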